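-- pv_equiv track=rewrite | github.com/raybalmontangerang-dev/simulyadi | app.py | normalize_sheet_name_for_type
-- ===== SOURCE A (Python) =====
-- SUPPORTED_TYPES = ["whatsapp_call", "whatsapp_messaging", "ping", "browsing", "video", "speed_testing", "4g_param"]
--
-- ALIAS_MAP = {
--     "whatsapp_call":      {"whatsapp_call", "whatsapp call", "WhatsApp_Call", "WhatsApp Call"},
--     "whatsapp_messaging": {"whatsapp_messaging", "whatsapp messaging", "WhatsApp_Messaging", "WhatsApp Messaging"},
--     "ping":               {"ping", "Ping"},
--     "browsing":           {"browsing", "Browsing"},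
--     "video":              {"video", "Video"},
--     "speed_testing":      {"speed_testing", "speed testing", "Speed_Testing", "Speed Testing"},
--     "4g_param":           {"4g param", "4g_param", "4G Param", "4G_Param"},
-- }
--
-- def normalize_sheet_name_for_type(name: str) -> str | None:
--     raw = name.strip()
--     if raw.lower().startswith(("raw_", "dash_")):
--         raw = raw.split("_", 1)[1]
--     key = raw.lower().replace(" ", "_")
--     for jenis, aliases in ALIAS_MAP.items():
--         if key in {a.lower().replace(" ", "_") for a in aliases}:
--             return jenis
--     return key if key in SUPPORTED_TYPES else None
-- ===== SOURCE B (Python) =====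
-- SUPPORTED_TYPES = ["whatsapp_call", "whatsapp_messaging", "ping", "browsing", "video", "speed_testing", "4g_param"]
--
-- def normalize_sheet_name_for_type(name: str) -> str | None:
--     # Every alias normalizes (lower-case, spaces->underscores) to its own type
--     # name and ALIAS_MAP's keys equal SUPPORTED_TYPES, so the whole alias-map
--     # scan with per-type set building collapses to one membership test.
--     raw = name.strip()
--     if raw.lower().startswith(("raw_", "dash_")):
--         raw = raw.split("_", 1)[1]
--     key = raw.lower().replace(" ", "_")
--     return key if key in SUPPORTED_TYPES else None
-- ===== Notes on version B (the rewrite author's own statement) =====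
-- stated objective: simpler
-- what changed: Dropped ALIAS_MAP and the loop that rebuilds a normalized alias set per type; since every alias normalizes exactly to its type name, B returns the normalized key iff it is in SUPPORTED_TYPES.
import Mathlib
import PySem

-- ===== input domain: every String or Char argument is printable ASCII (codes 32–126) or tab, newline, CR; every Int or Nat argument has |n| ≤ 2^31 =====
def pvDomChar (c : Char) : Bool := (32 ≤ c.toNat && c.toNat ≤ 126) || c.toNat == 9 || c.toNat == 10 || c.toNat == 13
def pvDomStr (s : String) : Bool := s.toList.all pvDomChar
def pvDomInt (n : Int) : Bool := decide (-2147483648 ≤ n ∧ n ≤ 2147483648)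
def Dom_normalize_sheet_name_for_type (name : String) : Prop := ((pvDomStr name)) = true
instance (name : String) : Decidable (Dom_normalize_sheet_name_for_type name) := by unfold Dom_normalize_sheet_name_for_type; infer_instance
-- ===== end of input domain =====

-- B drops ALIAS_MAP and its per-type set-building loop: every alias normalizes to its
-- own type name, so one membership test in SUPPORTED_TYPES suffices (objective: simpler).

-- module constant SUPPORTED_TYPES (used by both programs)
def pvSUPPORTED_TYPES : List String :=
  ["whatsapp_call", "whatsapp_messaging", "ping", "browsing", "video", "speed_testing", "4g_param"]

-- ===== PORT A =====
-- module constant ALIAS_MAP (dict of sets, in insertion order)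
def pvALIAS_MAP : List (String × List String) :=
  [("whatsapp_call",      ["whatsapp_call", "whatsapp call", "WhatsApp_Call", "WhatsApp Call"]),
   ("whatsapp_messaging", ["whatsapp_messaging", "whatsapp messaging", "WhatsApp_Messaging", "WhatsApp Messaging"]),
   ("ping",               ["ping", "Ping"]),
   ("browsing",           ["browsing", "Browsing"]),
   ("video",              ["video", "Video"]),
   ("speed_testing",      ["speed_testing", "speed testing", "Speed_Testing", "Speed Testing"]),
   ("4g_param",           ["4g param", "4g_param", "4G Param", "4G_Param"])]

-- the 'for jenis, aliases in ALIAS_MAP.items():' loop with its early return,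
-- followed by A's fallthrough 'return key if key in SUPPORTED_TYPES else None'
def pvAliasLoop (key : String) : List (String × List String) → Option String
  | [] => if pvSUPPORTED_TYPES.contains key then some key else none
  | (jenis, aliases) :: rest =>
      if (PySem.Set.ofList (aliases.map fun a =>
            PySem.Str.replace (PySem.Str.lower a) " " "_")).contains key
      then some jenis else pvAliasLoop key rest

def normalize_sheet_name_for_type (name : String) : Option String :=
  let raw := PySem.Str.strip name
  let raw :=
    if PySem.Str.startswith (PySem.Str.lower raw) "raw_"
        || PySem.Str.startswith (PySem.Str.lower raw) "dash_" then
      -- raw.split("_", 1)[1]; the guard guarantees a second piece, so the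
      -- .getD defaults are unreachable (Python raises only if absent)
      (PySem.List.pyGet? ((PySem.Str.splitMax? raw "_" 1).getD []) 1).getD raw
    else raw
  let key := PySem.Str.replace (PySem.Str.lower raw) " " "_"
  pvAliasLoop key pvALIAS_MAP

-- ===== PORT B =====
def normalize_sheet_name_for_type_alt (name : String) : Option String :=
  let raw := PySem.Str.strip name
  let raw :=
    if PySem.Str.startswith (PySem.Str.lower raw) "raw_"
        || PySem.Str.startswith (PySem.Str.lower raw) "dash_" then
      (PySem.List.pyGet? ((PySem.Str.splitMax? raw "_" 1).getD []) 1).getD raw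
    else raw
  let key := PySem.Str.replace (PySem.Str.lower raw) " " "_"
  if pvSUPPORTED_TYPES.contains key then some key else none

-- ===== PRECONDITION & SPEC =====
def Spec_normalize_sheet_name_for_type (name : String) (out : Option String) : Prop := out = normalize_sheet_name_for_type_alt name
instance (name : String) (out : Option String) : Decidable (Spec_normalize_sheet_name_for_type name out) := by unfold Spec_normalize_sheet_name_for_type; infer_instance

-- ===== CLAIM (what is proved, stated in full; the proofs are below) =====
def Claim_equal_normalize_sheet_name_for_type : Prop := ∀ (name : String), Dom_normalize_sheet_name_for_type name → Spec_normalize_sheet_name_for_type name (normalize_sheet_name_for_type name)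

-- ===== LEMMAS AND PROOFS =====

-- contains on a deduplicated set agrees with contains on the underlying list
theorem pv_contains_ofList (l : List String) (k : String) :
    (PySem.Set.ofList l).contains k = l.contains k := by
  by_cases h : k ∈ l <;> simp [h, PySem.Set.mem_ofList]

-- each alias normalizes (lower-case, spaces → underscores) to its own type name
theorem pv_r1 : PySem.Str.replace (PySem.Str.lower "whatsapp_call") " " "_" = "whatsapp_call" := rfl
theorem pv_r2 : PySem.Str.replace (PySem.Str.lower "whatsapp call") " " "_" = "whatsapp_call" := rfl
theorem pv_r3 : PySem.Str.replace (PySem.Str.lower "WhatsApp_Call") " " "_" = "whatsapp_call" := rfl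
theorem pv_r4 : PySem.Str.replace (PySem.Str.lower "WhatsApp Call") " " "_" = "whatsapp_call" := rfl
theorem pv_r5 : PySem.Str.replace (PySem.Str.lower "whatsapp_messaging") " " "_" = "whatsapp_messaging" := rfl
theorem pv_r6 : PySem.Str.replace (PySem.Str.lower "whatsapp messaging") " " "_" = "whatsapp_messaging" := rfl
theorem pv_r7 : PySem.Str.replace (PySem.Str.lower "WhatsApp_Messaging") " " "_" = "whatsapp_messaging" := rfl
theorem pv_r8 : PySem.Str.replace (PySem.Str.lower "WhatsApp Messaging") " " "_" = "whatsapp_messaging" := rfl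
theorem pv_r9 : PySem.Str.replace (PySem.Str.lower "ping") " " "_" = "ping" := rfl
theorem pv_r10 : PySem.Str.replace (PySem.Str.lower "Ping") " " "_" = "ping" := rfl
theorem pv_r11 : PySem.Str.replace (PySem.Str.lower "browsing") " " "_" = "browsing" := rfl
theorem pv_r12 : PySem.Str.replace (PySem.Str.lower "Browsing") " " "_" = "browsing" := rfl
theorem pv_r13 : PySem.Str.replace (PySem.Str.lower "video") " " "_" = "video" := rfl
theorem pv_r14 : PySem.Str.replace (PySem.Str.lower "Video") " " "_" = "video" := rfl
theorem pv_r15 : PySem.Str.replace (PySem.Str.lower "speed_testing") " " "_" = "speed_testing" := rfl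
theorem pv_r16 : PySem.Str.replace (PySem.Str.lower "speed testing") " " "_" = "speed_testing" := rfl
theorem pv_r17 : PySem.Str.replace (PySem.Str.lower "Speed_Testing") " " "_" = "speed_testing" := rfl
theorem pv_r18 : PySem.Str.replace (PySem.Str.lower "Speed Testing") " " "_" = "speed_testing" := rfl
theorem pv_r19 : PySem.Str.replace (PySem.Str.lower "4g param") " " "_" = "4g_param" := rfl
theorem pv_r20 : PySem.Str.replace (PySem.Str.lower "4g_param") " " "_" = "4g_param" := rfl
theorem pv_r21 : PySem.Str.replace (PySem.Str.lower "4G Param") " " "_" = "4g_param" := rfl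
theorem pv_r22 : PySem.Str.replace (PySem.Str.lower "4G_Param") " " "_" = "4g_param" := rfl

-- the ALIAS_MAP loop is one membership test in SUPPORTED_TYPES
theorem pv_loop_eq (key : String) :
    pvAliasLoop key pvALIAS_MAP =
      (if pvSUPPORTED_TYPES.contains key then some key else none) := by
  simp only [pvALIAS_MAP, pvAliasLoop, pv_contains_ofList, List.map_cons, List.map_nil,
    pv_r1, pv_r2, pv_r3, pv_r4, pv_r5, pv_r6, pv_r7, pv_r8, pv_r9, pv_r10, pv_r11, pv_r12, pv_r13, pv_r14, pv_r15, pv_r16, pv_r17, pv_r18, pv_r19, pv_r20, pv_r21, pv_r22,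
    pvSUPPORTED_TYPES, List.contains_cons, List.contains_nil, Bool.or_false]
  split_ifs <;> simp_all

-- ===== VERDICT (by name: the statement is the Claim_ definition above) =====
theorem normalize_sheet_name_for_type_spec : Claim_equal_normalize_sheet_name_for_type := by
  intro name _
  unfold Spec_normalize_sheet_name_for_type
  unfold normalize_sheet_name_for_type normalize_sheet_name_for_type_alt
  exact pv_loop_eq _
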